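-- pv_equiv track=rewrite | github.com/chohan3036/algo_study | 2020SS_LINE/LINE_1.py | solution
-- ===== SOURCE A (Python) =====
-- def solution(inputString):
--     open = {'(': 0, '{': 0, '[': 0, '<': 0}
--     close = {')': '(', '}': '{', ']': '[', '>': '<'}
--     ans = 0
--     for char in inputString:
--         if char in open:
--             open[char] += 1
--         elif char in close:
--             if open[close[char]] == 0:
--                 return -1
--             else:
--                 open[close[char]] -= 1
--                 if open[close[char]] == 0:
--                     ans += 1
--
--     for key in open:
--         if open[key] > 0:
--             return -1
--
--     return ans
-- ===== SOURCE B (Python) =====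
-- def solution(inputString):
--     total = 0
--     for opener, closer in (('(', ')'), ('{', '}'), ('[', ']'), ('<', '>')):
--         bal = 0
--         cnt = 0
--         for ch in inputString:
--             if ch == opener:
--                 bal += 1
--             elif ch == closer:
--                 bal -= 1
--                 if bal < 0:
--                     return -1
--                 if bal == 0:
--                     cnt += 1
--         if bal != 0:
--             return -1
--         total += cnt
--     return total
-- ===== Notes on version B (the rewrite author's own statement) =====
-- stated objective: alternative
-- what changed: Replaces the single combined scan over a dict of four counters (with early return on underflow) by four independent per-bracket-pair passes, each maintaining one integer balance and its own group count, summed at the end.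
import Mathlib
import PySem

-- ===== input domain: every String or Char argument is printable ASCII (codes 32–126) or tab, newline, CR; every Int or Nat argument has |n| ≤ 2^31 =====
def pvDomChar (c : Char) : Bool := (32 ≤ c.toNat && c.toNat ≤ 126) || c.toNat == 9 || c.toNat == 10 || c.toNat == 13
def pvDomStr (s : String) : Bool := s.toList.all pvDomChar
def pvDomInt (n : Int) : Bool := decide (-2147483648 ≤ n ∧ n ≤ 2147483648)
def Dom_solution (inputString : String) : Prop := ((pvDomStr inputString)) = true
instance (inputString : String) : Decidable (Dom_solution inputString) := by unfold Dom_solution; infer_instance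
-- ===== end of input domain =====

-- B replaces A's single combined scan over a dict of four counters by four independent
-- per-bracket-pair balance passes whose group counts are summed (alternative decomposition, same cost).


-- ===== PORT A =====
def pvOpen0 : PySem.Dict Char Int := PySem.Dict.ofList [('(', 0), ('{', 0), ('[', 0), ('<', 0)]

def pvClose : PySem.Dict Char Char := PySem.Dict.ofList [(')', '('), ('}', '{'), (']', '['), ('>', '<')]

-- one iteration of A's loop; `none` = the early `return -1`
def pvStepA (st : Option (PySem.Dict Char Int × Int)) (ch : Char) :
    Option (PySem.Dict Char Int × Int) :=
  match st with
  | none => none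
  | some (opn, ans) =>
    if opn.contains ch then some (opn.modify ch 0 (· + 1), ans)
    else if pvClose.contains ch then
      let k := pvClose.getD ch ' '
      if opn.getD k 0 = 0 then none
      else
        let opn' := opn.modify k 0 (· - 1)
        if opn'.getD k 0 = 0 then some (opn', ans + 1) else some (opn', ans)
    else some (opn, ans)

def solution (inputString : String) : Int :=
  match inputString.toList.foldl pvStepA (some (pvOpen0, 0)) with
  | none => -1
  | some (opn, ans) =>
    if opn.keys.any (fun k => decide (0 < opn.getD k 0)) then -1 else ans

-- ===== PORT B =====
-- one iteration of B's inner loop for the pair (opener, closer); `none` = the early `return -1`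
def pvStepB (opener closer : Char) (st : Option (Int × Int)) (ch : Char) : Option (Int × Int) :=
  match st with
  | none => none
  | some (bal, cnt) =>
    if ch = opener then some (bal + 1, cnt)
    else if ch = closer then
      let bal' := bal - 1
      if bal' < 0 then none
      else if bal' = 0 then some (bal', cnt + 1)
      else some (bal', cnt)
    else some (bal, cnt)

-- one full pass of B for one pair: `none` = error (underflow or leftover opens)
def pvPass (opener closer : Char) (cs : List Char) : Option Int :=
  match cs.foldl (pvStepB opener closer) (some (0, 0)) with
  | none => none
  | some (bal, cnt) => if bal ≠ 0 then none else some cnt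

def solution_alt (inputString : String) : Int :=
  match pvPass '(' ')' inputString.toList with
  | none => -1
  | some c1 =>
    match pvPass '{' '}' inputString.toList with
    | none => -1
    | some c2 =>
      match pvPass '[' ']' inputString.toList with
      | none => -1
      | some c3 =>
        match pvPass '<' '>' inputString.toList with
        | none => -1
        | some c4 => c1 + c2 + c3 + c4

-- ===== PRECONDITION & SPEC =====
def Spec_solution (inputString : String) (out : Int) : Prop := out = solution_alt inputString
instance (inputString : String) (out : Int) : Decidable (Spec_solution inputString out) := by unfold Spec_solution; infer_instance

-- ===== CLAIM (what is proved, stated in full; the proofs are below) =====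
def Claim_equal_solution : Prop := ∀ (inputString : String), Dom_solution inputString → Spec_solution inputString (solution inputString)

-- ===== LEMMAS AND PROOFS =====

-- A's dict state with the four counters abstracted
def pvMkD (b1 b2 b3 b4 : Int) : PySem.Dict Char Int :=
  PySem.Dict.mk [('(', b1), ('{', b2), ('[', b3), ('<', b4)]

-- combine B's four pass states into A's state
def pvComb (r1 r2 r3 r4 : Option (Int × Int)) : Option (PySem.Dict Char Int × Int) :=
  match r1, r2, r3, r4 with
  | some (b1, c1), some (b2, c2), some (b3, c3), some (b4, c4) =>
      some (pvMkD b1 b2 b3 b4, c1 + c2 + c3 + c4)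
  | _, _, _, _ => none

-- the balance in B's state never goes negative
def pvNN (r : Option (Int × Int)) : Prop := ∀ b c, r = some (b, c) → 0 ≤ b

-- computation lemmas for the literal-key dicts (all definitional)
lemma pvMod1 (b1 b2 b3 b4 : Int) (f : Int → Int) : (pvMkD b1 b2 b3 b4).modify '(' 0 f = pvMkD (f b1) b2 b3 b4 := rfl
lemma pvMod2 (b1 b2 b3 b4 : Int) (f : Int → Int) : (pvMkD b1 b2 b3 b4).modify '{' 0 f = pvMkD b1 (f b2) b3 b4 := rfl
lemma pvMod3 (b1 b2 b3 b4 : Int) (f : Int → Int) : (pvMkD b1 b2 b3 b4).modify '[' 0 f = pvMkD b1 b2 (f b3) b4 := rfl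
lemma pvMod4 (b1 b2 b3 b4 : Int) (f : Int → Int) : (pvMkD b1 b2 b3 b4).modify '<' 0 f = pvMkD b1 b2 b3 (f b4) := rfl
lemma pvGet1 (b1 b2 b3 b4 : Int) : (pvMkD b1 b2 b3 b4).getD '(' 0 = b1 := rfl
lemma pvGet2 (b1 b2 b3 b4 : Int) : (pvMkD b1 b2 b3 b4).getD '{' 0 = b2 := rfl
lemma pvGet3 (b1 b2 b3 b4 : Int) : (pvMkD b1 b2 b3 b4).getD '[' 0 = b3 := rfl
lemma pvGet4 (b1 b2 b3 b4 : Int) : (pvMkD b1 b2 b3 b4).getD '<' 0 = b4 := rfl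
lemma pvKeys (b1 b2 b3 b4 : Int) : (pvMkD b1 b2 b3 b4).keys = ['(', '{', '[', '<'] := rfl
lemma pvCont (b1 b2 b3 b4 : Int) (ch : Char) :
    (pvMkD b1 b2 b3 b4).contains ch = (ch == '(' || ch == '{' || ch == '[' || ch == '<') := by
  simp [pvMkD, PySem.Dict.contains_mk, Bool.beq_comm, Bool.or_assoc]
lemma pvCloseEq : pvClose = PySem.Dict.mk [(')', '('), ('}', '{'), (']', '['), ('>', '<')] := by
  decide
lemma pvClCont (ch : Char) :
    pvClose.contains ch = (ch == ')' || ch == '}' || ch == ']' || ch == '>') := by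
  rw [pvCloseEq]
  simp [PySem.Dict.contains_mk, Bool.beq_comm, Bool.or_assoc]
lemma pvCl1 : pvClose.getD ')' ' ' = '(' := rfl
lemma pvCl2 : pvClose.getD '}' ' ' = '{' := rfl
lemma pvCl3 : pvClose.getD ']' ' ' = '[' := rfl
lemma pvCl4 : pvClose.getD '>' ' ' = '<' := rfl

lemma pvNN_stepB (opener closer : Char) (r : Option (Int × Int)) (h : pvNN r) (ch : Char) :
    pvNN (pvStepB opener closer r ch) := by
  rcases r with _ | ⟨b, c⟩
  · intro b' c' h'; simp [pvStepB] at h'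
  · have hb := h b c rfl
    intro b' c' h'
    simp only [pvStepB] at h'
    split_ifs at h' with h1 h2 h3 h4 <;> simp_all <;> omega

lemma pvStep_comb (r1 r2 r3 r4 : Option (Int × Int)) (h1 : pvNN r1) (h2 : pvNN r2)
    (h3 : pvNN r3) (h4 : pvNN r4) (ch : Char) :
    pvStepA (pvComb r1 r2 r3 r4) ch =
      pvComb (pvStepB '(' ')' r1 ch) (pvStepB '{' '}' r2 ch)
             (pvStepB '[' ']' r3 ch) (pvStepB '<' '>' r4 ch) := by
  rcases r1 with _ | ⟨b1, c1⟩
  · simp [pvComb, pvStepB, pvStepA]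
  rcases r2 with _ | ⟨b2, c2⟩
  · cases pvStepB '(' ')' (some (b1, c1)) ch <;> simp [pvComb, pvStepB, pvStepA]
  rcases r3 with _ | ⟨b3, c3⟩
  · cases pvStepB '(' ')' (some (b1, c1)) ch <;>
      cases pvStepB '{' '}' (some (b2, c2)) ch <;> simp [pvComb, pvStepB, pvStepA]
  rcases r4 with _ | ⟨b4, c4⟩
  · cases pvStepB '(' ')' (some (b1, c1)) ch <;>
      cases pvStepB '{' '}' (some (b2, c2)) ch <;>
      cases pvStepB '[' ']' (some (b3, c3)) ch <;> simp [pvComb, pvStepB, pvStepA]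
  have hb1 : 0 ≤ b1 := h1 b1 c1 rfl
  have hb2 : 0 ≤ b2 := h2 b2 c2 rfl
  have hb3 : 0 ≤ b3 := h3 b3 c3 rfl
  have hb4 : 0 ≤ b4 := h4 b4 c4 rfl
  by_cases e1 : ch = '('
  · subst e1; simp [pvComb, pvStepA, pvStepB, pvCont, pvMod1]
  by_cases e2 : ch = '{'
  · subst e2; simp [pvComb, pvStepA, pvStepB, pvCont, pvMod2]
  by_cases e3 : ch = '['
  · subst e3; simp [pvComb, pvStepA, pvStepB, pvCont, pvMod3]
  by_cases e4 : ch = '<'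
  · subst e4; simp [pvComb, pvStepA, pvStepB, pvCont, pvMod4]
  by_cases f1 : ch = ')'
  · subst f1
    by_cases hz : b1 = 0
    · subst hz
      simp [pvComb, pvStepA, pvStepB, pvCont, pvClCont, pvCl1, pvGet1]
    · have hlt : ¬ (b1 - 1 < 0) := by omega
      by_cases ho : b1 - 1 = 0 <;>
        simp [pvComb, pvStepA, pvStepB, pvCont, pvClCont, pvCl1, pvGet1, pvMod1, hz, ho, hlt] <;>
        omega
  by_cases f2 : ch = '}'
  · subst f2
    by_cases hz : b2 = 0
    · subst hz
      simp [pvComb, pvStepA, pvStepB, pvCont, pvClCont, pvCl2, pvGet2]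
    · have hlt : ¬ (b2 - 1 < 0) := by omega
      by_cases ho : b2 - 1 = 0 <;>
        simp [pvComb, pvStepA, pvStepB, pvCont, pvClCont, pvCl2, pvGet2, pvMod2, hz, ho, hlt] <;>
        omega
  by_cases f3 : ch = ']'
  · subst f3
    by_cases hz : b3 = 0
    · subst hz
      simp [pvComb, pvStepA, pvStepB, pvCont, pvClCont, pvCl3, pvGet3]
    · have hlt : ¬ (b3 - 1 < 0) := by omega
      by_cases ho : b3 - 1 = 0 <;>
        simp [pvComb, pvStepA, pvStepB, pvCont, pvClCont, pvCl3, pvGet3, pvMod3, hz, ho, hlt] <;>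
        omega
  by_cases f4 : ch = '>'
  · subst f4
    by_cases hz : b4 = 0
    · subst hz
      simp [pvComb, pvStepA, pvStepB, pvCont, pvClCont, pvCl4, pvGet4]
    · have hlt : ¬ (b4 - 1 < 0) := by omega
      by_cases ho : b4 - 1 = 0 <;>
        simp [pvComb, pvStepA, pvStepB, pvCont, pvClCont, pvCl4, pvGet4, pvMod4, hz, ho, hlt] <;>
        omega
  · simp [pvComb, pvStepA, pvStepB, pvCont, pvClCont, e1, e2, e3, e4, f1, f2, f3, f4]

lemma pvInv (l : List Char) (r1 r2 r3 r4 : Option (Int × Int))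
    (h1 : pvNN r1) (h2 : pvNN r2) (h3 : pvNN r3) (h4 : pvNN r4) :
    l.foldl pvStepA (pvComb r1 r2 r3 r4) =
      pvComb (l.foldl (pvStepB '(' ')') r1) (l.foldl (pvStepB '{' '}') r2)
             (l.foldl (pvStepB '[' ']') r3) (l.foldl (pvStepB '<' '>') r4)
    ∧ pvNN (l.foldl (pvStepB '(' ')') r1) ∧ pvNN (l.foldl (pvStepB '{' '}') r2)
    ∧ pvNN (l.foldl (pvStepB '[' ']') r3) ∧ pvNN (l.foldl (pvStepB '<' '>') r4) := by
  induction l generalizing r1 r2 r3 r4 with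
  | nil => exact ⟨rfl, h1, h2, h3, h4⟩
  | cons ch l ih =>
    simp only [List.foldl_cons, pvStep_comb r1 r2 r3 r4 h1 h2 h3 h4 ch]
    exact ih _ _ _ _ (pvNN_stepB _ _ _ h1 ch) (pvNN_stepB _ _ _ h2 ch)
      (pvNN_stepB _ _ _ h3 ch) (pvNN_stepB _ _ _ h4 ch)

lemma pvNN_init : pvNN (some ((0 : Int), (0 : Int))) := by
  intro b c h; simp at h; omega

-- ===== VERDICT (by name: the statement is the Claim_ definition above) =====
theorem solution_spec : Claim_equal_solution := by
  intro s _
  unfold Spec_solution solution solution_alt pvPass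
  obtain ⟨heq, n1, n2, n3, n4⟩ :=
    pvInv s.toList (some (0, 0)) (some (0, 0)) (some (0, 0)) (some (0, 0))
      pvNN_init pvNN_init pvNN_init pvNN_init
  have hinit : (some (pvOpen0, (0 : Int))) =
      pvComb (some (0, 0)) (some (0, 0)) (some (0, 0)) (some (0, 0)) := rfl
  rw [hinit, heq]
  rcases hf1 : s.toList.foldl (pvStepB '(' ')') (some (0, 0)) with _ | ⟨b1, c1⟩
  · simp [pvComb]
  rcases hf2 : s.toList.foldl (pvStepB '{' '}') (some (0, 0)) with _ | ⟨b2, c2⟩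
  · simp [pvComb]; split_ifs <;> rfl
  rcases hf3 : s.toList.foldl (pvStepB '[' ']') (some (0, 0)) with _ | ⟨b3, c3⟩
  · simp [pvComb]; split_ifs <;> rfl
  rcases hf4 : s.toList.foldl (pvStepB '<' '>') (some (0, 0)) with _ | ⟨b4, c4⟩
  · simp [pvComb]; split_ifs <;> rfl
  have hb1 := n1 b1 c1 hf1
  have hb2 := n2 b2 c2 hf2
  have hb3 := n3 b3 c3 hf3
  have hb4 := n4 b4 c4 hf4
  by_cases z1 : b1 = 0
  · by_cases z2 : b2 = 0
    · by_cases z3 : b3 = 0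
      · by_cases z4 : b4 = 0
        · subst z1 z2 z3 z4
          simp [pvComb, pvKeys, pvGet1, pvGet2, pvGet3, pvGet4]
        · simp [pvComb, pvKeys, pvGet1, pvGet2, pvGet3, pvGet4,
            z1, z2, z3, z4, show 0 < b4 by omega]
      · simp [pvComb, pvKeys, pvGet1, pvGet2, pvGet3, pvGet4,
          z1, z2, z3, show 0 < b3 by omega]
    · simp [pvComb, pvKeys, pvGet1, pvGet2, pvGet3, pvGet4,
        z1, z2, show 0 < b2 by omega]
  · simp [pvComb, pvKeys, pvGet1, pvGet2, pvGet3, pvGet4,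
      z1, show 0 < b1 by omega]
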